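-- pv_equiv track=rewrite | github.com/jasonho2582001/comp0138-pytctracer | data/trace_parser_dynamic.py | last_call_before_assert
-- ===== SOURCE A (Python) =====
-- from collections import defaultdict
-- from typing import Optional, Set, List, Dict, Tuple
--
-- def last_call_before_assert(data: List[Dict[str, str]], function_names: Set[str], test_names: Set[str]) -> Dict[str, Set[str]]:
--     """FIX TRACER BECAUSE IF FUNCTION RETURNS IN-LINE WITH AN ASSERT IT WILL NOT CATCH THE ASSERT"""
--     functions_called_before_assert_for_each_test = defaultdict(set)
--     current_test = None
--     last_returned_function = None
--
--     for record in data: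
--         if record["Testing Method"] == "TEST METHOD CALL":
--             current_test = record["Fully Qualified Function Name"]
--             last_returned_function = None
--         elif record["Testing Method"] == "TEST METHOD RETURN":
--             current_test = None
--         elif current_test is not None and record["Event Type"] == "RETURN" and record["Function Type"] == "SOURCE":
--             last_returned_function = record["Fully Qualified Function Name"]
--         elif current_test is not None and last_returned_function is not None and record["Function Type"] == "ASSERT":
--             # Won't catch the last returned function if there was no return before an assert in the current test
--             functions_called_before_assert_for_each_test[current_test].add(last_returned_function)
--
--     lcba_dict = {test_name: {function_name: 0 for function_name in function_names} for test_name in test_names}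
--
--     for test_name, functions_called_before_assert in functions_called_before_assert_for_each_test.items():
--         for function_name in functions_called_before_assert:
--             lcba_dict[test_name][function_name] = 1
--
--     return lcba_dict
-- ===== SOURCE B (Python) =====
-- def last_call_before_assert(data, function_names, test_names):
--     """Segment-based: split the trace at each TEST METHOD CALL record into independent
--     test segments (a CALL resets the last-returned function, so segments share no state),
--     truncate each segment at its first TEST METHOD RETURN, and write 1s directly into the
--     pre-built result table while walking the segment."""
--     lcba_dict = {test_name: {function_name: 0 for function_name in function_names}
--                  for test_name in test_names}
--     starts = [i for i, record in enumerate(data)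
--               if record["Testing Method"] == "TEST METHOD CALL"]
--     for k, start in enumerate(starts):
--         test_name = data[start]["Fully Qualified Function Name"]
--         end = starts[k + 1] if k + 1 < len(starts) else len(data)
--         last_returned_function = None
--         for record in data[start + 1:end]:
--             if record["Testing Method"] == "TEST METHOD RETURN":
--                 break
--             if record["Event Type"] == "RETURN" and record["Function Type"] == "SOURCE":
--                 last_returned_function = record["Fully Qualified Function Name"]
--             elif last_returned_function is not None and record["Function Type"] == "ASSERT":
--                 lcba_dict[test_name][last_returned_function] = 1
--     return lcba_dict
-- ===== Notes on version B (the rewrite author's own statement) =====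
-- stated objective: alternative
-- what changed: B replaces A's one-pass current_test/last_returned_function state machine with defaultdict(set) accumulator and trailing projection loop by a group-by decomposition: the trace is split into independent per-test segments at each TEST METHOD CALL, each segment is walked on its own (break at TEST METHOD RETURN) and 1s are written directly into the pre-built result table.
import Mathlib
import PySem

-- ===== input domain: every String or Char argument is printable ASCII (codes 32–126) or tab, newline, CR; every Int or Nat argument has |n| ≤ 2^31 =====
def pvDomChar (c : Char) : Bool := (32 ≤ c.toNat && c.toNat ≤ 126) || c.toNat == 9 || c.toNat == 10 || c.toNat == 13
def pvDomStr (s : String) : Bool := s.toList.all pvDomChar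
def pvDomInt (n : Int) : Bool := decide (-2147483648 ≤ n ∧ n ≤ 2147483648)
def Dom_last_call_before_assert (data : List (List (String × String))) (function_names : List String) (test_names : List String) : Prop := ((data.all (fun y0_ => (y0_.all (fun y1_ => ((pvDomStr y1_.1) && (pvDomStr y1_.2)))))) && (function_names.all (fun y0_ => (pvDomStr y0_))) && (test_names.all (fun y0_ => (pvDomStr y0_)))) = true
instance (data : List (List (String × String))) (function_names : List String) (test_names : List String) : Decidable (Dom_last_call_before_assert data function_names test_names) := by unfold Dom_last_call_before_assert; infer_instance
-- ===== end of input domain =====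

-- B replaces A's state-machine scan plus defaultdict accumulator plus trailing projection loop by a
-- group-by decomposition: split the trace into per-test segments at each TEST METHOD CALL, then walk
-- each segment independently (break at TEST METHOD RETURN) writing 1s straight into the pre-built
-- table; objective: alternative (same cost, different decomposition).


-- ===== PORT A =====
-- record["k"] (a dict lookup; none = KeyError, excluded by Pre_)
def pvRecGet (r : List (String × String)) (k : String) : Option String :=
  (PySem.Dict.mk r).get? k

-- one iteration of A's scan; state = (defaultdict accumulator, current_test, last_returned_function)
def pvStepA (st : PySem.Dict String (PySem.Set String) × Option String × Option String)
    (r : List (String × String)) :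
    PySem.Dict String (PySem.Set String) × Option String × Option String :=
  if pvRecGet r "Testing Method" = some "TEST METHOD CALL" then
    (st.1, pvRecGet r "Fully Qualified Function Name", none)
  else if pvRecGet r "Testing Method" = some "TEST METHOD RETURN" then
    (st.1, none, st.2.2)
  else
    match st.2.1 with
    | none => st
    | some t =>
      if pvRecGet r "Event Type" = some "RETURN" ∧ pvRecGet r "Function Type" = some "SOURCE" then
        (st.1, some t, pvRecGet r "Fully Qualified Function Name")
      else
        match st.2.2 with
        | none => st
        | some f =>
          if pvRecGet r "Function Type" = some "ASSERT" then
            -- defaultdict(set): functions_called_before_assert_for_each_test[t].add(f)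
            (st.1.insert t ((st.1.getD t PySem.Set.empty).add f), some t, some f)
          else st

def last_call_before_assert (data : List (List (String × String))) (function_names : List String) (test_names : List String) : List (String × List (String × Int)) :=
  let fca := (data.foldl pvStepA (PySem.Dict.empty, none, none)).1
  -- lcba_dict = {t: {f: 0 for f in function_names} for t in test_names}
  let lcba0 : PySem.Dict String (PySem.Dict String Int) :=
    test_names.foldl
      (fun d t => d.insert t (function_names.foldl (fun inner f => inner.insert f 0) PySem.Dict.empty))
      PySem.Dict.empty
  -- for t, s in fca.items(): for f in s: lcba_dict[t][f] = 1
  -- (where Python raises KeyError — t not a key of lcba0, excluded by Pre_ — modify inserts instead)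
  let lcba := fca.items.foldl
    (fun d p => p.2.foldl
      (fun d f => d.modify p.1 PySem.Dict.empty (fun inner => inner.insert f (1 : Int))) d)
    lcba0
  lcba.items.map (fun p => (p.1, p.2.items))

-- ===== PORT B =====
-- pass 1 of B: group the trace into segments, one per TEST METHOD CALL record
-- (segments.append((record["FQN"], [])) / segments[-1][1].append(record); the test name is an
-- Option: none models the KeyError Python raises there, excluded by Pre_)
def pvSegsF : List (List (String × String)) →
    List (Option String × List (List (String × String))) →
    List (Option String × List (List (String × String)))
  | [], acc => acc
  | r :: rest, acc =>
    if pvRecGet r "Testing Method" = some "TEST METHOD CALL" then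
      pvSegsF rest (acc ++ [(pvRecGet r "Fully Qualified Function Name", [])])
    else
      match acc.getLast? with
      | some lastSeg => pvSegsF rest (acc.dropLast ++ [(lastSeg.1, lastSeg.2 ++ [r])])
      | none => pvSegsF rest acc

-- pass 2 of B, inner loop over one segment's records; 'break' at TEST METHOD RETURN returns the
-- table as it stands (lcba_dict[test][last] = 1 is the modify; missing test key = KeyError, excluded by Pre_)
def pvSegRun : List (List (String × String)) → String → Option String →
    PySem.Dict String (PySem.Dict String Int) → PySem.Dict String (PySem.Dict String Int)
  | [], _, _, d => d
  | r :: rest, t, last, d =>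
    if pvRecGet r "Testing Method" = some "TEST METHOD RETURN" then d
    else if pvRecGet r "Event Type" = some "RETURN" ∧ pvRecGet r "Function Type" = some "SOURCE" then
      pvSegRun rest t (pvRecGet r "Fully Qualified Function Name") d
    else
      match last with
      | some f =>
        if pvRecGet r "Function Type" = some "ASSERT" then
          pvSegRun rest t (some f) (d.modify t PySem.Dict.empty (fun inner => inner.insert f (1 : Int)))
        else pvSegRun rest t (some f) d
      | none => pvSegRun rest t none d

def last_call_before_assert_alt (data : List (List (String × String))) (function_names : List String) (test_names : List String) : List (String × List (String × Int)) :=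
  let lcba0 : PySem.Dict String (PySem.Dict String Int) :=
    test_names.foldl
      (fun d t => d.insert t (function_names.foldl (fun inner f => inner.insert f 0) PySem.Dict.empty))
      PySem.Dict.empty
  let lcba := (pvSegsF data []).foldl
    (fun d p => match p.1 with
      | some t => pvSegRun p.2 t none d
      | none => d)   -- none: the CALL record had no "Fully Qualified Function Name" key (KeyError, outside Pre_)
    lcba0
  lcba.items.map (fun p => (p.1, p.2.items))

-- ===== PRECONDITION & SPEC =====
-- Pre_ excludes the inputs on which A raises KeyError: a record missing "Testing Method", a record
-- read while a test is active missing "Event Type" / "Function Type" / (for a SOURCE RETURN)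
-- "Fully Qualified Function Name", and a TEST METHOD CALL whose test name is absent or outside
-- test_names (A and B raise KeyError when such a test records a pair). The condition is per-record
-- and thereby slightly stronger than the exact raising condition (e.g. a CALL naming an unknown test
-- that never records a pair, or a missing "Function Type" that A's short-circuit never reads, is also
-- excluded); on every such over-excluded input A returns and B returns the same value.
def pvTMf (r : List (String × String)) : Option String := (PySem.Dict.mk r).get? "Testing Method"
def pvETf (r : List (String × String)) : Option String := (PySem.Dict.mk r).get? "Event Type"
def pvFTf (r : List (String × String)) : Option String := (PySem.Dict.mk r).get? "Function Type"
def pvFQf (r : List (String × String)) : Option String := (PySem.Dict.mk r).get? "Fully Qualified Function Name"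
-- "a test is active at index i": a TEST METHOD CALL at some j < i with no TEST METHOD RETURN after it before i
def pvCtSetB (data : List (List (String × String))) (i : Nat) : Bool :=
  (List.range i).any (fun j =>
    pvTMf (data.getD j []) == some "TEST METHOD CALL" &&
    (List.range i).all (fun k =>
      !(decide (j < k)) || !(pvTMf (data.getD k []) == some "TEST METHOD RETURN")))
def pvRecCondB (data : List (List (String × String))) (tn : List String) (i : Nat) : Bool :=
  let r := data.getD i []
  if pvTMf r = none then false
  else if pvTMf r = some "TEST METHOD CALL" then tn.any (fun s => pvFQf r == some s)
  else if pvTMf r = some "TEST METHOD RETURN" then true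
  else if pvCtSetB data i then
    (pvETf r).isSome && (pvFTf r).isSome &&
    (if pvETf r = some "RETURN" ∧ pvFTf r = some "SOURCE" then (pvFQf r).isSome else true)
  else true
def Pre_last_call_before_assert (data : List (List (String × String))) (function_names : List String) (test_names : List String) : Prop :=
  ∀ i < data.length, pvRecCondB data test_names i = true

instance (data : List (List (String × String))) (function_names : List String) (test_names : List String) : Decidable (Pre_last_call_before_assert data function_names test_names) := by
  unfold Pre_last_call_before_assert; infer_instance

def pvWitness_last_call_before_assert : (List (List (String × String))) × List String × List String :=
  ([[("Testing Method", "TEST METHOD CALL"), ("Fully Qualified Function Name", "t")],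
    [("Testing Method", "X"), ("Event Type", "RETURN"), ("Function Type", "SOURCE"),
     ("Fully Qualified Function Name", "g")],
    [("Testing Method", "X"), ("Event Type", "CALL"), ("Function Type", "ASSERT")]],
   ["f"], ["t"])

def Spec_last_call_before_assert (data : List (List (String × String))) (function_names : List String) (test_names : List String) (out : List (String × List (String × Int))) : Prop := out = last_call_before_assert_alt data function_names test_names
instance (data : List (List (String × String))) (function_names : List String) (test_names : List String) (out : List (String × List (String × Int))) : Decidable (Spec_last_call_before_assert data function_names test_names out) := by unfold Spec_last_call_before_assert; infer_instance

-- ===== CLAIM (what is proved, stated in full; the proofs are below) =====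
def Claim_equal_last_call_before_assert : Prop := ∀ (data : List (List (String × String))) (function_names : List String) (test_names : List String), Dom_last_call_before_assert data function_names test_names → Pre_last_call_before_assert data function_names test_names → Spec_last_call_before_assert data function_names test_names (last_call_before_assert data function_names test_names)

-- ===== LEMMAS AND PROOFS =====

-- ---- the common intermediate form: A's scan writing its 1s directly into the table ----
def pvScanD : List (List (String × String)) → Option String → Option String →
    PySem.Dict String (PySem.Dict String Int) → PySem.Dict String (PySem.Dict String Int)
  | [], _, _, d => d
  | r :: rest, ct, lrf, d =>
    if pvRecGet r "Testing Method" = some "TEST METHOD CALL" then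
      pvScanD rest (pvRecGet r "Fully Qualified Function Name") none d
    else if pvRecGet r "Testing Method" = some "TEST METHOD RETURN" then
      pvScanD rest none lrf d
    else
      match ct with
      | none => pvScanD rest none lrf d
      | some t =>
        if pvRecGet r "Event Type" = some "RETURN" ∧ pvRecGet r "Function Type" = some "SOURCE" then
          pvScanD rest (some t) (pvRecGet r "Fully Qualified Function Name") d
        else
          match lrf with
          | none => pvScanD rest (some t) none d
          | some f =>
            if pvRecGet r "Function Type" = some "ASSERT" then
              pvScanD rest (some t) (some f)
                (d.modify t PySem.Dict.empty (fun inner => inner.insert f (1 : Int)))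
            else pvScanD rest (some t) (some f) d

-- A's trailing double loop, as a named function (definitionally the foldl in port A)
def pvApplyAll (D : PySem.Dict String (PySem.Dict String Int))
    (items : List (String × PySem.Set String)) : PySem.Dict String (PySem.Dict String Int) :=
  items.foldl
    (fun d p => p.2.foldl
      (fun d f => d.modify p.1 PySem.Dict.empty (fun inner => inner.insert f (1 : Int))) d)
    D

-- per-entry effect of pvApplyAll
def pvEnt (items : List (String × PySem.Set String)) (p : String × PySem.Dict String Int) :
    String × PySem.Dict String Int :=
  match (PySem.Dict.mk items).get? p.1 with
  | some S => (p.1, S.foldl (fun i f => i.insert f (1 : Int)) p.2)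
  | none => p

theorem pvEnt_fst (items : List (String × PySem.Set String)) (p : String × PySem.Dict String Int) :
    (pvEnt items p).1 = p.1 := by
  unfold pvEnt
  rcases h : (PySem.Dict.mk items).get? p.1 with _ | S <;> simp

theorem pvGet_foldIns (S : List String) :
    ∀ (i : PySem.Dict String Int) (f : String),
    (S.foldl (fun i g => i.insert g (1 : Int)) i).get? f = if f ∈ S then some 1 else i.get? f := by
  induction S with
  | nil => intro i f; simp
  | cons g S ih =>
    intro i f
    rw [List.foldl_cons, ih]
    by_cases hf : f ∈ S
    · simp [hf]
    · by_cases hg : f = g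
      · simp [hf, hg, PySem.Dict.get?_insert_self]
      · simp [hf, hg, PySem.Dict.get?_insert_of_ne _ _ hg]

theorem pvInsert_self_eq {ν : Type} (d : PySem.Dict String ν) (k : String) (v : ν)
    (hnd : d.keys.Nodup) (hv : d.get? k = some v) : d.insert k v = d := by
  have hc : d.contains k = true := by
    rw [PySem.Dict.contains_eq_isSome_get?, hv]; rfl
  apply PySem.Dict.ext
  rw [PySem.Dict.items_insert_of_contains d v hc]
  conv_rhs => rw [← List.map_id d.items]
  apply List.map_congr_left
  intro p hp
  obtain ⟨p1, p2⟩ := p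
  by_cases he : p1 = k
  · subst he
    have hmem : d.get? p1 = some p2 :=
      (PySem.Dict.get?_eq_some_iff_mem_items d p1 p2 hnd).mpr hp
    rw [hv] at hmem
    obtain rfl : v = p2 := by injection hmem
    simp
  · simp [he]

theorem pvModify_items {ν : Type} (d : PySem.Dict String ν) (t : String) (d0 : ν) (g : ν → ν)
    (hnd : d.keys.Nodup) (hc : d.contains t = true) :
    (d.modify t d0 g).items = d.items.map (fun p => if p.1 = t then (p.1, g p.2) else p) := by
  have hmod : d.modify t d0 g = d.insert t (g (d.getD t d0)) := rfl
  rw [hmod, PySem.Dict.items_insert_of_contains d _ hc]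
  apply List.map_congr_left
  intro p hp
  obtain ⟨p1, p2⟩ := p
  by_cases he : p1 = t
  · subst he
    have hg : d.getD p1 d0 = p2 := PySem.Dict.getD_of_mem_items d hp hnd d0
    simp [hg]
  · simp [he]

theorem pvEnt_of_get?_none (items : List (String × PySem.Set String))
    (p : String × PySem.Dict String Int) (h : (PySem.Dict.mk items).get? p.1 = none) :
    pvEnt items p = p := by
  unfold pvEnt; rw [h]

theorem pvEnt_of_get?_some (items : List (String × PySem.Set String))
    (p : String × PySem.Dict String Int) (S : PySem.Set String)
    (h : (PySem.Dict.mk items).get? p.1 = some S) :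
    pvEnt items p = (p.1, S.foldl (fun i f => i.insert f (1 : Int)) p.2) := by
  unfold pvEnt; rw [h]

theorem pvInner_items (S : PySem.Set String) :
    ∀ (d : PySem.Dict String (PySem.Dict String Int)) (t : String),
    d.keys.Nodup → d.contains t = true →
    (S.foldl (fun d f => d.modify t PySem.Dict.empty (fun inner => inner.insert f (1 : Int))) d).items
      = d.items.map (fun p => if p.1 = t then (p.1, S.foldl (fun i f => i.insert f (1 : Int)) p.2) else p) := by
  induction S with
  | nil =>
    intro d t _ _
    simp
  | cons f S ih =>
    intro d t hnd hc
    rw [List.foldl_cons]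
    have hstep := pvModify_items d t PySem.Dict.empty (fun inner => inner.insert f (1 : Int)) hnd hc
    have hkeys : (d.modify t PySem.Dict.empty (fun inner => inner.insert f (1 : Int))).keys = d.keys := by
      simp only [PySem.Dict.keys, hstep, List.map_map]
      apply List.map_congr_left
      intro p _
      by_cases he : p.1 = t <;> simp [Function.comp, he]
    rw [ih _ t (by rw [hkeys]; exact hnd)
        (by rw [PySem.Dict.contains_iff_mem_keys, hkeys]
            exact (PySem.Dict.contains_iff_mem_keys d t).mp hc),
        hstep, List.map_map]
    apply List.map_congr_left
    intro p _
    by_cases he : p.1 = t <;> simp [Function.comp, he]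

theorem pvApplyAll_items :
    ∀ (items : List (String × PySem.Set String)) (D : PySem.Dict String (PySem.Dict String Int)),
    D.keys.Nodup → (items.map (fun q => q.1)).Nodup →
    (∀ k ∈ items.map (fun q => q.1), D.contains k = true) →
    (pvApplyAll D items).items = D.items.map (pvEnt items) := by
  intro items
  induction items with
  | nil =>
    intro D _ _ _
    have h0 : ∀ p : String × PySem.Dict String Int, pvEnt [] p = p := by
      intro p
      exact pvEnt_of_get?_none [] p rfl
    show D.items = List.map (pvEnt []) D.items
    conv_lhs => rw [← List.map_id D.items]
    apply List.map_congr_left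
    intro p _
    rw [h0 p]
    rfl
  | cons q rest ih =>
    intro D hD hnd hcon
    obtain ⟨t, S⟩ := q
    have hct : D.contains t = true := hcon t (by simp)
    have hstep := pvInner_items S D t hD hct
    have hkeys : (S.foldl (fun d f => d.modify t PySem.Dict.empty (fun inner => inner.insert f (1 : Int))) D).keys = D.keys := by
      simp only [PySem.Dict.keys, hstep, List.map_map]
      apply List.map_congr_left
      intro p _
      by_cases he : p.1 = t <;> simp [Function.comp, he]
    have htnotin : t ∉ rest.map (fun q => q.1) := by
      simp only [List.map_cons, List.nodup_cons] at hnd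
      exact hnd.1
    have hA : pvApplyAll D ((t, S) :: rest)
        = pvApplyAll (S.foldl (fun d f => d.modify t PySem.Dict.empty (fun inner => inner.insert f (1 : Int))) D) rest := rfl
    rw [hA, ih _ (by rw [hkeys]; exact hD) (by simpa using hnd.of_cons)
        (by intro k hk
            rw [PySem.Dict.contains_iff_mem_keys, hkeys]
            exact (PySem.Dict.contains_iff_mem_keys D k).mp (hcon k (by simp [hk]))),
        hstep, List.map_map]
    apply List.map_congr_left
    intro p _
    obtain ⟨p1, p2⟩ := p
    show pvEnt rest (if p1 = t then (p1, S.foldl (fun i f => i.insert f (1 : Int)) p2) else (p1, p2))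
        = pvEnt ((t, S) :: rest) (p1, p2)
    by_cases he : p1 = t
    · rw [if_pos he]
      have h1 : (PySem.Dict.mk rest).get?
          ((p1 : String), S.foldl (fun i f => i.insert f (1 : Int)) p2).1 = none := by
        rw [PySem.Dict.get?_eq_none_iff_not_mem_keys, PySem.Dict.keys_mk]
        simpa [he] using htnotin
      rw [pvEnt_of_get?_none rest _ h1,
          pvEnt_of_get?_some ((t, S) :: rest) (p1, p2) S
            (by rw [PySem.Dict.get?_mk_cons]; simp [he])]
    · rw [if_neg he]
      rcases h2 : (PySem.Dict.mk rest).get? p1 with _ | S'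
      · rw [pvEnt_of_get?_none rest _ h2,
            pvEnt_of_get?_none ((t, S) :: rest) (p1, p2)
              (by rw [PySem.Dict.get?_mk_cons]
                  simp only [show (t == p1) = false by simp [Ne.symm he]]
                  exact h2)]
      · rw [pvEnt_of_get?_some rest _ S' h2,
            pvEnt_of_get?_some ((t, S) :: rest) (p1, p2) S'
              (by rw [PySem.Dict.get?_mk_cons]
                  simp only [show (t == p1) = false by simp [Ne.symm he]]
                  exact h2)]

-- recording one (test, function) pair into the accumulator = one direct write into the table
theorem pvKey (D : PySem.Dict String (PySem.Dict String Int))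
    (fca : PySem.Dict String (PySem.Set String)) (t f : String)
    (hD1 : D.keys.Nodup) (hD3 : ∀ p ∈ D.items, p.2.keys.Nodup)
    (hk : fca.keys.Nodup) (hsub : ∀ k ∈ fca.keys, D.contains k = true)
    (ht : D.contains t = true) :
    pvApplyAll D (fca.insert t (PySem.Set.add (fca.getD t PySem.Set.empty) f)).items
      = (pvApplyAll D fca.items).modify t PySem.Dict.empty (fun inner => inner.insert f (1 : Int)) := by
  have hfca_keys : fca.items.map (fun q => q.1) = fca.keys := rfl
  have hY : (pvApplyAll D fca.items).items = D.items.map (pvEnt fca.items) :=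
    pvApplyAll_items fca.items D hD1 (by rw [hfca_keys]; exact hk)
      (by rw [hfca_keys]; exact hsub)
  have hYkeys : (pvApplyAll D fca.items).keys = D.keys := by
    simp only [PySem.Dict.keys, hY, List.map_map]
    apply List.map_congr_left
    intro p _
    simp [Function.comp, pvEnt_fst]
  have hYnd : (pvApplyAll D fca.items).keys.Nodup := by rw [hYkeys]; exact hD1
  have hYct : (pvApplyAll D fca.items).contains t = true := by
    rw [PySem.Dict.contains_iff_mem_keys, hYkeys]
    exact (PySem.Dict.contains_iff_mem_keys D t).mp ht
  set fca' := fca.insert t (PySem.Set.add (fca.getD t PySem.Set.empty) f) with hfca'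
  have hk' : fca'.keys.Nodup := PySem.Dict.nodup_keys_insert _ _ _ hk
  have hsub' : ∀ k ∈ fca'.keys, D.contains k = true := by
    intro k hkk
    rcases (PySem.Dict.mem_keys_insert _ _ _ _).mp hkk with h | h
    · exact h ▸ ht
    · exact hsub k h
  have hL : (pvApplyAll D fca'.items).items = D.items.map (pvEnt fca'.items) :=
    pvApplyAll_items fca'.items D hD1 (by exact hk') (by exact hsub')
  apply PySem.Dict.ext
  rw [hL, pvModify_items _ t PySem.Dict.empty _ hYnd hYct, hY, List.map_map]
  apply List.map_congr_left
  intro p hp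
  have hinner : p.2.keys.Nodup := hD3 p hp
  have hcomp : ((fun p => if p.1 = t then (p.1, p.2.insert f (1 : Int)) else p) ∘ pvEnt fca.items) p
      = (if (pvEnt fca.items p).1 = t then ((pvEnt fca.items p).1, (pvEnt fca.items p).2.insert f (1 : Int)) else pvEnt fca.items p) := rfl
  rw [hcomp, pvEnt_fst]
  have hget' : (PySem.Dict.mk fca'.items).get? p.1 = fca'.get? p.1 := rfl
  by_cases he : p.1 = t
  · have h1 : (PySem.Dict.mk fca'.items).get? p.1 = some (PySem.Set.add (fca.getD t PySem.Set.empty) f) := by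
      rw [hget', hfca', he]; exact PySem.Dict.get?_insert_self _ _ _
    rw [pvEnt_of_get?_some fca'.items p _ h1, if_pos he]
    rcases h2 : fca.get? p.1 with _ | S
    · -- t not yet a key of the accumulator: the stored set is [f]
      have hS0 : fca.getD t PySem.Set.empty = PySem.Set.empty := by
        rw [← he]; exact PySem.Dict.getD_of_get?_eq_none _ _ h2
      have hadd : PySem.Set.add (fca.getD t PySem.Set.empty) f = [f] := by
        rw [hS0]; rfl
      rw [pvEnt_of_get?_none fca.items p h2, hadd]
      rfl
    · have hS0 : fca.getD t PySem.Set.empty = S := by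
        rw [PySem.Dict.getD_eq_get?_getD, ← he, h2]; rfl
      rw [pvEnt_of_get?_some fca.items p S h2, hS0]
      by_cases hfS : f ∈ S
      · -- the pair was already recorded: both sides leave the entry unchanged
        have hadd : PySem.Set.add S f = S := by simp [PySem.Set.add, hfS]
        have habs : (S.foldl (fun i g => i.insert g (1 : Int)) p.2).insert f 1
            = S.foldl (fun i g => i.insert g (1 : Int)) p.2 := by
          apply pvInsert_self_eq
          · exact PySem.Dict.nodup_keys_foldl_insert S (fun _ _ => (1 : Int)) p.2 hinner
          · rw [pvGet_foldIns, if_pos hfS]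
        rw [hadd]
        exact (congrArg (fun z => ((p.1 : String), z)) habs).symm
      · have hadd : PySem.Set.add S f = S ++ [f] := by simp [PySem.Set.add, hfS]
        rw [hadd, List.foldl_append]
        rfl
  · have h1 : (PySem.Dict.mk fca'.items).get? p.1 = fca.get? p.1 := by
      rw [hget', hfca']; exact PySem.Dict.get?_insert_of_ne _ _ he
    rw [if_neg he]
    rcases h2 : fca.get? p.1 with _ | S
    · rw [pvEnt_of_get?_none fca'.items p (by rw [h1]; exact h2),
          pvEnt_of_get?_none fca.items p h2]
    · rw [pvEnt_of_get?_some fca'.items p S (by rw [h1]; exact h2),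
          pvEnt_of_get?_some fca.items p S h2]

-- ---- index characterisation of "a test is active", stepping rules ----
theorem pvCtSetB_iff (data : List (List (String × String))) (i : Nat) :
    pvCtSetB data i = true ↔
    ∃ j < i, pvTMf (data.getD j []) = some "TEST METHOD CALL" ∧
      ∀ k < i, j < k → pvTMf (data.getD k []) ≠ some "TEST METHOD RETURN" := by
  simp [pvCtSetB, List.any_eq_true, List.all_eq_true, List.mem_range]
  constructor
  · rintro ⟨j, hj, hc, hk⟩
    refine ⟨j, hj, hc, fun k hk2 hjk => ?_⟩
    rcases hk k hk2 with h | h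
    · omega
    · exact h
  · rintro ⟨j, hj, hc, hk⟩
    refine ⟨j, hj, hc, fun k hk2 => ?_⟩
    by_cases hjk : j < k
    · exact Or.inr (hk k hk2 hjk)
    · exact Or.inl (by omega)

theorem pvCtSetB_succ_call (data : List (List (String × String))) (n : Nat)
    (h : pvTMf (data.getD n []) = some "TEST METHOD CALL") :
    pvCtSetB data (n + 1) = true := by
  rw [pvCtSetB_iff]
  exact ⟨n, by omega, h, fun k hk hjk => by omega⟩

theorem pvCtSetB_succ_ret (data : List (List (String × String))) (n : Nat)
    (h : pvTMf (data.getD n []) = some "TEST METHOD RETURN") :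
    pvCtSetB data (n + 1) = false := by
  rcases Bool.eq_false_or_eq_true (pvCtSetB data (n+1)) with ht | hf
  · exfalso
    rcases (pvCtSetB_iff data (n+1)).mp ht with ⟨j, hj, hc, hk⟩
    by_cases hjn : j = n
    · rw [hjn, h] at hc; simp at hc
    · exact hk n (by omega) (by omega) h
  · exact hf

theorem pvCtSetB_succ_other (data : List (List (String × String))) (n : Nat)
    (h1 : pvTMf (data.getD n []) ≠ some "TEST METHOD CALL")
    (h2 : pvTMf (data.getD n []) ≠ some "TEST METHOD RETURN") :
    pvCtSetB data (n + 1) = pvCtSetB data n := by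
  rcases Bool.eq_false_or_eq_true (pvCtSetB data n) with ht | hf
  swap
  · rw [hf]
    rcases Bool.eq_false_or_eq_true (pvCtSetB data (n+1)) with ht2 | hf2
    swap
    · exact hf2
    · exfalso
      rcases (pvCtSetB_iff data (n+1)).mp ht2 with ⟨j, hj, hc, hk⟩
      by_cases hjn : j = n
      · exact h1 (hjn ▸ hc)
      · have : pvCtSetB data n = true := by
          rw [pvCtSetB_iff]
          exact ⟨j, by omega, hc, fun k hk2 hjk => hk k (by omega) hjk⟩
        rw [this] at hf; exact Bool.false_ne_true hf.symm
  · rw [ht]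
    rcases (pvCtSetB_iff data n).mp ht with ⟨j, hj, hc, hk⟩
    rw [pvCtSetB_iff]
    refine ⟨j, by omega, hc, fun k hk2 hjk => ?_⟩
    by_cases hkn : k = n
    · exact hkn ▸ h2
    · exact hk k (by omega) hjk

-- ---- A's fold, fused: accumulating then projecting = writing directly during the scan ----
theorem pvFoldA_scanD (data : List (List (String × String))) (tn : List String)
    (hrec : ∀ i < data.length, pvRecCondB data tn i = true)
    (D : PySem.Dict String (PySem.Dict String Int))
    (hD1 : D.keys.Nodup) (hD2 : ∀ t ∈ tn, D.contains t = true)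
    (hD3 : ∀ p ∈ D.items, p.2.keys.Nodup) :
    ∀ (rest : List (List (String × String))) (n : Nat) fca ct lrf,
    n + rest.length = data.length →
    (∀ m < rest.length, rest.getD m [] = data.getD (n + m) []) →
    ct.isSome = pvCtSetB data n →
    fca.keys.Nodup → (∀ k ∈ fca.keys, k ∈ tn) → (∀ t, ct = some t → t ∈ tn) →
    pvApplyAll D (List.foldl pvStepA (fca, ct, lrf) rest).1.items
      = pvScanD rest ct lrf (pvApplyAll D fca.items) := by
  intro rest
  induction rest with
  | nil => intro n fca ct lrf _ _ _ _ _ _; rfl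
  | cons r rest ih =>
    intro n fca ct lrf hlen hslice hcts hnd hkeys hct
    have hn : n < data.length := by simp at hlen; omega
    have hr0 : r = data.getD n [] := by
      have := hslice 0 (by simp)
      simpa using this
    have hcnd := hrec n hn
    have hslice' : ∀ m < rest.length, rest.getD m [] = data.getD (n + 1 + m) [] := by
      intro m hm
      have h2 := hslice (m + 1) (by simp; omega)
      rw [show n + (m + 1) = n + 1 + m by omega] at h2
      simpa using h2
    have hlen' : n + 1 + rest.length = data.length := by simp at hlen; omega
    rw [List.foldl_cons]
    by_cases h1 : (PySem.Dict.mk r).get? "Testing Method" = some "TEST METHOD CALL"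
    · have hTM : pvTMf (data.getD n []) = some "TEST METHOD CALL" := by
        unfold pvTMf; rw [← hr0]; exact h1
      have hstep : pvStepA (fca, ct, lrf) r = (fca, pvRecGet r "Fully Qualified Function Name", none) := by
        simp [pvStepA, pvRecGet, h1]
      have hscan : pvScanD (r :: rest) ct lrf (pvApplyAll D fca.items)
          = pvScanD rest (pvRecGet r "Fully Qualified Function Name") none (pvApplyAll D fca.items) := by
        simp [pvScanD, pvRecGet, h1]
      rw [hstep, hscan]
      have hTM' : pvTMf (data[n]?.getD []) = some "TEST METHOD CALL" := by simpa using hTM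
      simp [pvRecCondB, hTM'] at hcnd
      rcases hcnd with ⟨s, hs, he⟩
      have hfq : pvRecGet r "Fully Qualified Function Name" = some s := by
        unfold pvRecGet; rw [hr0]
        simpa [pvFQf] using he
      apply ih (n + 1) _ _ _ hlen' hslice'
      · rw [hfq, pvCtSetB_succ_call data n hTM]
        rfl
      · exact hnd
      · exact hkeys
      · intro t hft
        rw [hfq] at hft
        obtain rfl : s = t := by injection hft
        exact hs
    · by_cases h2 : (PySem.Dict.mk r).get? "Testing Method" = some "TEST METHOD RETURN"
      · have hTM : pvTMf (data.getD n []) = some "TEST METHOD RETURN" := by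
          unfold pvTMf; rw [← hr0]; exact h2
        have hstep : pvStepA (fca, ct, lrf) r = (fca, none, lrf) := by
          simp [pvStepA, pvRecGet, h1, h2]
        have hscan : pvScanD (r :: rest) ct lrf (pvApplyAll D fca.items)
            = pvScanD rest none lrf (pvApplyAll D fca.items) := by
          simp [pvScanD, pvRecGet, h1, h2]
        rw [hstep, hscan]
        apply ih (n + 1) _ _ _ hlen' hslice'
        · rw [pvCtSetB_succ_ret data n hTM]
          rfl
        · exact hnd
        · exact hkeys
        · simp
      · have hTM1 : pvTMf (data.getD n []) ≠ some "TEST METHOD CALL" := by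
          unfold pvTMf; rw [← hr0]; exact h1
        have hTM2 : pvTMf (data.getD n []) ≠ some "TEST METHOD RETURN" := by
          unfold pvTMf; rw [← hr0]; exact h2
        have hctsucc : pvCtSetB data (n + 1) = pvCtSetB data n :=
          pvCtSetB_succ_other data n hTM1 hTM2
        cases ct with
        | none =>
          have hstep : pvStepA (fca, none, lrf) r = (fca, none, lrf) := by
            simp [pvStepA, pvRecGet, h1, h2]
          have hscan : pvScanD (r :: rest) none lrf (pvApplyAll D fca.items)
              = pvScanD rest none lrf (pvApplyAll D fca.items) := by
            simp [pvScanD, pvRecGet, h1, h2]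
          rw [hstep, hscan]
          apply ih (n + 1) _ _ _ hlen' hslice'
          · rw [hctsucc]; exact hcts
          · exact hnd
          · exact hkeys
          · simp
        | some t =>
          have hctn : pvCtSetB data n = true := by rw [← hcts]; rfl
          by_cases h3 : (PySem.Dict.mk r).get? "Event Type" = some "RETURN" ∧
              (PySem.Dict.mk r).get? "Function Type" = some "SOURCE"
          · have hstep : pvStepA (fca, some t, lrf) r
                = (fca, some t, pvRecGet r "Fully Qualified Function Name") := by
              simp [pvStepA, pvRecGet, h1, h2, h3]
            have hscan : pvScanD (r :: rest) (some t) lrf (pvApplyAll D fca.items)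
                = pvScanD rest (some t) (pvRecGet r "Fully Qualified Function Name") (pvApplyAll D fca.items) := by
              simp [pvScanD, pvRecGet, h1, h2, h3]
            rw [hstep, hscan]
            apply ih (n + 1) _ _ _ hlen' hslice'
            · rw [hctsucc]; exact hcts
            · exact hnd
            · exact hkeys
            · exact hct
          · cases lrf with
            | none =>
              have hstep : pvStepA (fca, some t, none) r = (fca, some t, none) := by
                simp [pvStepA, pvRecGet, h1, h2, h3]
              have hscan : pvScanD (r :: rest) (some t) none (pvApplyAll D fca.items)
                  = pvScanD rest (some t) none (pvApplyAll D fca.items) := by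
                simp [pvScanD, pvRecGet, h1, h2, h3]
              rw [hstep, hscan]
              apply ih (n + 1) _ _ _ hlen' hslice'
              · rw [hctsucc]; exact hcts
              · exact hnd
              · exact hkeys
              · exact hct
            | some f =>
              by_cases h4 : (PySem.Dict.mk r).get? "Function Type" = some "ASSERT"
              · have hstep : pvStepA (fca, some t, some f) r
                    = (fca.insert t ((fca.getD t PySem.Set.empty).add f), some t, some f) := by
                  simp [pvStepA, pvRecGet, h1, h2, h3, h4]
                have hscan : pvScanD (r :: rest) (some t) (some f) (pvApplyAll D fca.items)
                    = pvScanD rest (some t) (some f)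
                        ((pvApplyAll D fca.items).modify t PySem.Dict.empty
                          (fun inner => inner.insert f (1 : Int))) := by
                  simp [pvScanD, pvRecGet, h1, h2, h3, h4]
                rw [hstep, hscan]
                have htt : t ∈ tn := hct t rfl
                rw [← pvKey D fca t f hD1 hD3 hnd
                    (fun k hk => hD2 k (hkeys k hk)) (hD2 t htt)]
                apply ih (n + 1) _ _ _ hlen' hslice'
                · rw [hctsucc]; exact hcts
                · exact PySem.Dict.nodup_keys_insert _ _ _ hnd
                · intro k hk
                  rcases (PySem.Dict.mem_keys_insert _ _ _ _).mp hk with h | h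
                  · exact h ▸ htt
                  · exact hkeys k h
                · exact hct
              · have hstep : pvStepA (fca, some t, some f) r = (fca, some t, some f) := by
                  simp [pvStepA, pvRecGet, h1, h2, h3, h4]
                have hscan : pvScanD (r :: rest) (some t) (some f) (pvApplyAll D fca.items)
                    = pvScanD rest (some t) (some f) (pvApplyAll D fca.items) := by
                  simp [pvScanD, pvRecGet, h1, h2, h3, h4]
                rw [hstep, hscan]
                apply ih (n + 1) _ _ _ hlen' hslice'
                · rw [hctsucc]; exact hcts
                · exact hnd
                · exact hkeys
                · exact hct

-- ---- B's two passes = the fused scan ----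
def pvNC (r : List (String × String)) : Bool :=
  !decide (pvRecGet r "Testing Method" = some "TEST METHOD CALL")

-- recursive characterisation of B's grouping pass
def pvSegsTail : List (List (String × String)) →
    List (Option String × List (List (String × String)))
  | [] => []
  | r :: rest =>
    if pvRecGet r "Testing Method" = some "TEST METHOD CALL" then
      (pvRecGet r "Fully Qualified Function Name", rest.takeWhile pvNC)
        :: pvSegsTail (rest.dropWhile pvNC)
    else pvSegsTail rest
  termination_by data => data.length
  decreasing_by
  · exact Nat.lt_succ_of_le (List.length_dropWhile_le pvNC rest)
  · exact Nat.lt_succ_of_le le_rfl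

theorem pvSegsF_acc :
    ∀ (data : List (List (String × String)))
      (acc : List (Option String × List (List (String × String))))
      (t : Option String) (cur : List (List (String × String))),
    pvSegsF data (acc ++ [(t, cur)])
      = (acc ++ [(t, cur ++ data.takeWhile pvNC)]) ++ pvSegsTail (data.dropWhile pvNC) := by
  intro data
  induction data with
  | nil => intro acc t cur; simp [pvSegsF, pvSegsTail]
  | cons r rest ih =>
    intro acc t cur
    by_cases hc : pvRecGet r "Testing Method" = some "TEST METHOD CALL"
    · have hnc : pvNC r = false := by simp [pvNC, hc]
      rw [show pvSegsF (r :: rest) (acc ++ [(t, cur)])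
            = pvSegsF rest ((acc ++ [(t, cur)]) ++ [(pvRecGet r "Fully Qualified Function Name", [])])
          by simp [pvSegsF, hc]]
      rw [ih]
      rw [show (r :: rest).takeWhile pvNC = [] by simp [List.takeWhile_cons, hnc]]
      rw [show (r :: rest).dropWhile pvNC = r :: rest by simp [List.dropWhile_cons, hnc]]
      rw [show pvSegsTail (r :: rest)
            = (pvRecGet r "Fully Qualified Function Name", rest.takeWhile pvNC)
                :: pvSegsTail (rest.dropWhile pvNC) by rw [pvSegsTail]; simp [hc]]
      simp
    · have hnc : pvNC r = true := by simp [pvNC, hc]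
      rw [show pvSegsF (r :: rest) (acc ++ [(t, cur)])
            = pvSegsF rest (acc ++ [(t, cur ++ [r])])
          by simp [pvSegsF, hc, List.getLast?_concat, List.dropLast_concat]]
      rw [ih]
      rw [show (r :: rest).takeWhile pvNC = r :: rest.takeWhile pvNC by simp [List.takeWhile_cons, hnc]]
      rw [show (r :: rest).dropWhile pvNC = rest.dropWhile pvNC by simp [List.dropWhile_cons, hnc]]
      simp

theorem pvSegsF_nil :
    ∀ (data : List (List (String × String))), pvSegsF data [] = pvSegsTail data := by
  intro data
  induction data with
  | nil => simp [pvSegsF, pvSegsTail]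
  | cons r rest ih =>
    by_cases hc : pvRecGet r "Testing Method" = some "TEST METHOD CALL"
    · rw [show pvSegsF (r :: rest) []
            = pvSegsF rest ([] ++ [(pvRecGet r "Fully Qualified Function Name", [])])
          by simp [pvSegsF, hc]]
      rw [pvSegsF_acc]
      rw [show pvSegsTail (r :: rest)
            = (pvRecGet r "Fully Qualified Function Name", rest.takeWhile pvNC)
                :: pvSegsTail (rest.dropWhile pvNC) by rw [pvSegsTail]; simp [hc]]
      simp
    · rw [show pvSegsF (r :: rest) [] = pvSegsF rest [] by simp [pvSegsF, hc]]
      rw [show pvSegsTail (r :: rest) = pvSegsTail rest by rw [pvSegsTail]; simp [hc]]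
      exact ih

-- with no test active, the scan writes nothing and keeps its state across non-CALL records
theorem pvScanD_inert :
    ∀ (seg : List (List (String × String))),
    (∀ r ∈ seg, ¬ pvRecGet r "Testing Method" = some "TEST METHOD CALL") →
    ∀ (rest : List (List (String × String))) lrf d,
    pvScanD (seg ++ rest) none lrf d = pvScanD rest none lrf d := by
  intro seg
  induction seg with
  | nil => intro _ _ _ _; rfl
  | cons r seg ih =>
    intro hnc rest lrf d
    have h1 : ¬ pvRecGet r "Testing Method" = some "TEST METHOD CALL" := hnc r (by simp)
    by_cases h2 : pvRecGet r "Testing Method" = some "TEST METHOD RETURN" <;>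
      simp [pvScanD, h1, h2, ih (fun x hx => hnc x (by simp [hx]))]

theorem pvScanD_callhead (r : List (String × String))
    (h : pvRecGet r "Testing Method" = some "TEST METHOD CALL")
    (xs : List (List (String × String))) (ct lrf : Option String)
    (d : PySem.Dict String (PySem.Dict String Int)) :
    pvScanD (r :: xs) ct lrf d = pvScanD xs (pvRecGet r "Fully Qualified Function Name") none d := by
  simp [pvScanD, h]

-- walking one active segment: the scan agrees with B's per-segment loop (break at RETURN)
theorem pvSegWalk :
    ∀ (seg : List (List (String × String))),
    (∀ r ∈ seg, ¬ pvRecGet r "Testing Method" = some "TEST METHOD CALL") →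
    ∀ (t : String) (lrf : Option String) d,
    ∃ ct' lrf', ∀ rest,
      pvScanD (seg ++ rest) (some t) lrf d = pvScanD rest ct' lrf' (pvSegRun seg t lrf d) := by
  intro seg
  induction seg with
  | nil => intro _ t lrf d; exact ⟨some t, lrf, fun rest => rfl⟩
  | cons r seg ih =>
    intro hnc t lrf d
    have h1 : ¬ pvRecGet r "Testing Method" = some "TEST METHOD CALL" := hnc r (by simp)
    have hnc' : ∀ x ∈ seg, ¬ pvRecGet x "Testing Method" = some "TEST METHOD CALL" :=
      fun x hx => hnc x (by simp [hx])
    by_cases h2 : pvRecGet r "Testing Method" = some "TEST METHOD RETURN"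
    · refine ⟨none, lrf, fun rest => ?_⟩
      rw [show pvSegRun (r :: seg) t lrf d = d by simp [pvSegRun, h2]]
      rw [show pvScanD ((r :: seg) ++ rest) (some t) lrf d
            = pvScanD (seg ++ rest) none lrf d by simp [pvScanD, h1, h2]]
      exact pvScanD_inert seg hnc' rest lrf d
    · by_cases h3 : pvRecGet r "Event Type" = some "RETURN" ∧
          pvRecGet r "Function Type" = some "SOURCE"
      · obtain ⟨ct', lrf', hrec⟩ := ih hnc' t (pvRecGet r "Fully Qualified Function Name") d
        refine ⟨ct', lrf', fun rest => ?_⟩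
        rw [show pvSegRun (r :: seg) t lrf d
              = pvSegRun seg t (pvRecGet r "Fully Qualified Function Name") d
            by simp [pvSegRun, h2, h3]]
        rw [show pvScanD ((r :: seg) ++ rest) (some t) lrf d
              = pvScanD (seg ++ rest) (some t) (pvRecGet r "Fully Qualified Function Name") d
            by simp [pvScanD, h1, h2, h3]]
        exact hrec rest
      · cases lrf with
        | none =>
          obtain ⟨ct', lrf', hrec⟩ := ih hnc' t none d
          refine ⟨ct', lrf', fun rest => ?_⟩
          rw [show pvSegRun (r :: seg) t none d = pvSegRun seg t none d
              by simp [pvSegRun, h2, h3]]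
          rw [show pvScanD ((r :: seg) ++ rest) (some t) none d
                = pvScanD (seg ++ rest) (some t) none d by simp [pvScanD, h1, h2, h3]]
          exact hrec rest
        | some f =>
          by_cases h4 : pvRecGet r "Function Type" = some "ASSERT"
          · obtain ⟨ct', lrf', hrec⟩ := ih hnc' t (some f)
              (d.modify t PySem.Dict.empty (fun inner => inner.insert f (1 : Int)))
            refine ⟨ct', lrf', fun rest => ?_⟩
            rw [show pvSegRun (r :: seg) t (some f) d
                  = pvSegRun seg t (some f)
                      (d.modify t PySem.Dict.empty (fun inner => inner.insert f (1 : Int)))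
                by simp [pvSegRun, h2, h3, h4]]
            rw [show pvScanD ((r :: seg) ++ rest) (some t) (some f) d
                  = pvScanD (seg ++ rest) (some t) (some f)
                      (d.modify t PySem.Dict.empty (fun inner => inner.insert f (1 : Int)))
                by simp [pvScanD, h1, h2, h3, h4]]
            exact hrec rest
          · obtain ⟨ct', lrf', hrec⟩ := ih hnc' t (some f) d
            refine ⟨ct', lrf', fun rest => ?_⟩
            rw [show pvSegRun (r :: seg) t (some f) d = pvSegRun seg t (some f) d
                by simp [pvSegRun, h2, h3, h4]]
            rw [show pvScanD ((r :: seg) ++ rest) (some t) (some f) d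
                  = pvScanD (seg ++ rest) (some t) (some f) d by simp [pvScanD, h1, h2, h3, h4]]
            exact hrec rest

theorem pvScanD_procSegs :
    ∀ (n : Nat) (data : List (List (String × String))), data.length ≤ n →
    ∀ (lrf : Option String) d,
    pvScanD data none lrf d
      = (pvSegsTail data).foldl
          (fun d p => match p.1 with
            | some t => pvSegRun p.2 t none d
            | none => d) d := by
  intro n
  induction n with
  | zero =>
    intro data hlen lrf d
    rw [List.length_eq_zero_iff.mp (Nat.le_zero.mp hlen)]
    simp [pvScanD, pvSegsTail]
  | succ n ih =>
    intro data hlen lrf d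
    cases data with
    | nil => simp [pvScanD, pvSegsTail]
    | cons r rest =>
      by_cases hc : pvRecGet r "Testing Method" = some "TEST METHOD CALL"
      · rw [pvScanD_callhead r hc, pvSegsTail]
        rw [if_pos hc]
        have hsplit : rest = rest.takeWhile pvNC ++ rest.dropWhile pvNC :=
          (List.takeWhile_append_dropWhile).symm
        have htake : ∀ x ∈ rest.takeWhile pvNC,
            ¬ pvRecGet x "Testing Method" = some "TEST METHOD CALL" := by
          intro x hx
          have := List.mem_takeWhile_imp hx
          simpa [pvNC] using this
        have hlen' : (rest.dropWhile pvNC).length ≤ n := by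
          have h1 : (rest.dropWhile pvNC).length ≤ rest.length :=
            List.length_dropWhile_le pvNC rest
          simp at hlen
          omega
        rcases hfq : pvRecGet r "Fully Qualified Function Name" with _ | t
        · rw [show pvScanD rest none none d
                = pvScanD (rest.dropWhile pvNC) none none d by
              conv_lhs => rw [hsplit]
              exact pvScanD_inert _ htake _ none d]
          rw [ih _ hlen' none d]
          simp
        · obtain ⟨ct', lrf', hrec⟩ := pvSegWalk (rest.takeWhile pvNC) htake t none d
          rw [show pvScanD rest (some t) none d
                = pvScanD (rest.dropWhile pvNC) ct' lrf'
                    (pvSegRun (rest.takeWhile pvNC) t none d) by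
              conv_lhs => rw [hsplit]
              exact hrec _]
          have hdrop : pvScanD (rest.dropWhile pvNC) ct' lrf'
                (pvSegRun (rest.takeWhile pvNC) t none d)
              = pvScanD (rest.dropWhile pvNC) none none
                (pvSegRun (rest.takeWhile pvNC) t none d) := by
            rcases hd : rest.dropWhile pvNC with _ | ⟨r', xs⟩
            · rfl
            · have hne : rest.dropWhile pvNC ≠ [] := by rw [hd]; simp
              have hh := List.head_dropWhile_not pvNC hne
              simp only [hd, List.head_cons] at hh
              have hcall' : pvRecGet r' "Testing Method" = some "TEST METHOD CALL" := by
                simpa [pvNC] using hh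
              rw [pvScanD_callhead r' hcall', pvScanD_callhead r' hcall']
          rw [hdrop, ih _ hlen' none _]
          simp
      · rw [pvSegsTail]
        rw [if_neg hc]
        have hstep : pvScanD (r :: rest) none lrf d = pvScanD rest none lrf d := by
          by_cases h2 : pvRecGet r "Testing Method" = some "TEST METHOD RETURN" <;>
            simp [pvScanD, hc, h2]
        rw [hstep]
        exact ih rest (by simp at hlen; omega) lrf d

-- ---- facts about the pre-built zero table ----
theorem pvLcba0_nodup (tn fn : List String) :
    (tn.foldl
      (fun (d : PySem.Dict String (PySem.Dict String Int)) t =>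
        d.insert t (fn.foldl (fun inner f => inner.insert f 0) PySem.Dict.empty))
      PySem.Dict.empty).keys.Nodup :=
  PySem.Dict.nodup_keys_foldl_insert tn _ PySem.Dict.empty (by simp)

theorem pvLcba0_contains (tn fn : List String) (t : String) (ht : t ∈ tn) :
    (tn.foldl
      (fun (d : PySem.Dict String (PySem.Dict String Int)) t =>
        d.insert t (fn.foldl (fun inner f => inner.insert f 0) PySem.Dict.empty))
      PySem.Dict.empty).contains t = true := by
  rw [PySem.Dict.contains_iff_mem_keys,
      PySem.Dict.keys_foldl_insert tn _ PySem.Dict.empty]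
  have h := (PySem.Set.mem_ofList tn t).mpr ht
  rw [PySem.Set.ofList_eq_foldl] at h
  exact h

theorem pvLcba0_values (fn : List String) :
    ∀ (tn : List String) (d : PySem.Dict String (PySem.Dict String Int)),
    (∀ p ∈ d.items, p.2.keys.Nodup) →
    ∀ p ∈ (tn.foldl
        (fun d t => d.insert t (fn.foldl (fun inner f => inner.insert f 0) PySem.Dict.empty))
        d).items, p.2.keys.Nodup := by
  intro tn
  induction tn with
  | nil => intro d hd p hp; exact hd p hp
  | cons t tn ih =>
    intro d hd p hp
    rw [List.foldl_cons] at hp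
    refine ih _ ?_ p hp
    intro q hq
    rcases (PySem.Dict.mem_items_insert _ _ _ _).mp hq with h | h
    · rw [h]
      exact PySem.Dict.nodup_keys_foldl_insert fn (fun _ _ => (0 : Int)) PySem.Dict.empty (by simp)
    · exact hd q h.1

-- ===== VERDICT (by name: the statement is the Claim_ definition above) =====
theorem last_call_before_assert_spec : Claim_equal_last_call_before_assert := by
  intro data fn tn _hdom hpre
  unfold Spec_last_call_before_assert last_call_before_assert last_call_before_assert_alt
  dsimp only
  set lcba0 : PySem.Dict String (PySem.Dict String Int) :=
    tn.foldl
      (fun d t => d.insert t (fn.foldl (fun inner f => inner.insert f 0) PySem.Dict.empty))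
      PySem.Dict.empty with hlcba0
  have hD1 : lcba0.keys.Nodup := by rw [hlcba0]; exact pvLcba0_nodup tn fn
  have hD2 : ∀ t ∈ tn, lcba0.contains t = true := by
    rw [hlcba0]; exact fun t ht => pvLcba0_contains tn fn t ht
  have hD3 : ∀ p ∈ lcba0.items, p.2.keys.Nodup := by
    rw [hlcba0]; exact pvLcba0_values fn tn PySem.Dict.empty (by simp [PySem.Dict.empty])
  have hA : ((data.foldl pvStepA (PySem.Dict.empty, none, none)).1.items.foldl
        (fun d p => p.2.foldl
          (fun d f => d.modify p.1 PySem.Dict.empty (fun inner => inner.insert f (1 : Int))) d)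
        lcba0)
      = pvScanD data none none lcba0 := by
    have := pvFoldA_scanD data tn hpre lcba0 hD1 hD2 hD3 data 0
      PySem.Dict.empty none none (by simp) (fun m hm => by simp) rfl
      (by simp [PySem.Dict.empty, PySem.Dict.keys]) (by simp [PySem.Dict.empty, PySem.Dict.keys])
      (by simp)
    simpa [pvApplyAll, PySem.Dict.empty] using this
  have hB : ((pvSegsF data []).foldl
        (fun d p => match p.1 with
          | some t => pvSegRun p.2 t none d
          | none => d)
        lcba0)
      = pvScanD data none none lcba0 := by
    rw [pvSegsF_nil data]
    exact (pvScanD_procSegs data.length data le_rfl none lcba0).symm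
  rw [hA, hB]
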